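-- pv_equiv track=rewrite | github.com/UpStackLabs/nexus-backend | model-server/main.py | _infer_scene_from_url
-- ===== SOURCE A (Python) =====
-- def _infer_scene_from_url(image_url: str) -> str:
--     """Heuristic scene type from URL tokens."""
--     lower = image_url.lower()
--     if any(t in lower for t in ("military", "war", "army", "combat", "weapon", "missile", "tank")):
--         return "military"
--     if any(t in lower for t in ("flood", "quake", "fire", "disaster", "storm", "hurricane")):
--         return "natural_disaster"
--     if any(t in lower for t in ("protest", "riot", "demonstration", "unrest")):
--         return "protest"
--     return "generic"
-- ===== SOURCE B (Python) =====
-- # Flat token map + min-priority fold: one pass over all keywords with an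
-- # accumulator instead of three short-circuiting if/any branches.
-- TOKEN_PRI = {
--     "military": (0, "military"), "war": (0, "military"), "army": (0, "military"),
--     "combat": (0, "military"), "weapon": (0, "military"), "missile": (0, "military"),
--     "tank": (0, "military"),
--     "flood": (1, "natural_disaster"), "quake": (1, "natural_disaster"),
--     "fire": (1, "natural_disaster"), "disaster": (1, "natural_disaster"),
--     "storm": (1, "natural_disaster"), "hurricane": (1, "natural_disaster"),
--     "protest": (2, "protest"), "riot": (2, "protest"),
--     "demonstration": (2, "protest"), "unrest": (2, "protest"),
-- }
--
-- def _infer_scene_from_url(image_url: str) -> str: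
--     """Heuristic scene type from URL tokens."""
--     lower = image_url.lower()
--     best = (3, "generic")
--     for tok, cand in TOKEN_PRI.items():
--         if cand[0] < best[0] and tok in lower:
--             best = cand
--     return best[1]
-- ===== Notes on version B (the rewrite author's own statement) =====
-- stated objective: alternative
-- what changed: Replaced the three short-circuiting if/any branches by a single flat token->(priority,label) map folded once with a min-priority accumulator; the branch structure and early returns disappear.
import Mathlib
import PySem

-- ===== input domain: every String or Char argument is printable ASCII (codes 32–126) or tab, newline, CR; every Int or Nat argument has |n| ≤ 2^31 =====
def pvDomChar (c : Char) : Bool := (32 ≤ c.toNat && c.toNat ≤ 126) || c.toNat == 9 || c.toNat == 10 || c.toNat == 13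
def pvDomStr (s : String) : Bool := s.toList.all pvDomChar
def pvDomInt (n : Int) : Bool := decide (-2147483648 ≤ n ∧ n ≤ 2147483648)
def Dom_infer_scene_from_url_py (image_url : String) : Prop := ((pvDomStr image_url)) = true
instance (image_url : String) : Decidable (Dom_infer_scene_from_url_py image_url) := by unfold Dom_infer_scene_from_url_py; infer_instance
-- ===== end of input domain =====

-- B replaces A's three short-circuiting if/any branches by one fold over a flat
-- token->(priority,label) map with a min-priority accumulator (objective: alternative).

-- ===== PORT A =====
-- Literal port of A: lowercase once, then three any-substring branches in order.
def infer_scene_from_url_py (image_url : String) : String :=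
  let lower := PySem.Str.lower image_url
  if ["military", "war", "army", "combat", "weapon", "missile", "tank"].any
      (fun t => PySem.Str.isIn t lower) then "military"
  else if ["flood", "quake", "fire", "disaster", "storm", "hurricane"].any
      (fun t => PySem.Str.isIn t lower) then "natural_disaster"
  else if ["protest", "riot", "demonstration", "unrest"].any
      (fun t => PySem.Str.isIn t lower) then "protest"
  else "generic"

-- ===== PORT B =====
-- B: flat token -> (priority, label) map (dict in insertion order), folded once
-- keeping the lowest-priority matching entry.
def pvTokenPri : List (String × (Int × String)) :=
  [("military", (0, "military")), ("war", (0, "military")), ("army", (0, "military")),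
   ("combat", (0, "military")), ("weapon", (0, "military")), ("missile", (0, "military")),
   ("tank", (0, "military")),
   ("flood", (1, "natural_disaster")), ("quake", (1, "natural_disaster")),
   ("fire", (1, "natural_disaster")), ("disaster", (1, "natural_disaster")),
   ("storm", (1, "natural_disaster")), ("hurricane", (1, "natural_disaster")),
   ("protest", (2, "protest")), ("riot", (2, "protest")),
   ("demonstration", (2, "protest")), ("unrest", (2, "protest"))]

def infer_scene_from_url_py_alt (image_url : String) : String :=
  let lower := PySem.Str.lower image_url
  let best := pvTokenPri.foldl
    (fun best tc => if tc.2.1 < best.1 ∧ PySem.Str.isIn tc.1 lower = true then tc.2 else best)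
    ((3 : Int), "generic")
  best.2

-- ===== PRECONDITION & SPEC =====
def Spec_infer_scene_from_url_py (image_url : String) (out : String) : Prop := out = infer_scene_from_url_py_alt image_url
instance (image_url : String) (out : String) : Decidable (Spec_infer_scene_from_url_py image_url out) := by unfold Spec_infer_scene_from_url_py; infer_instance

-- ===== CLAIM (what is proved, stated in full; the proofs are below) =====
def Claim_equal_infer_scene_from_url_py : Prop := ∀ (image_url : String), Dom_infer_scene_from_url_py image_url → Spec_infer_scene_from_url_py image_url (infer_scene_from_url_py image_url)

-- ===== LEMMAS AND PROOFS =====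

-- Folding one constant-priority group: it changes the accumulator iff the group
-- can still win (p < b.1) and one of its tokens occurs in `lower`.
theorem pvFoldGroup (lower : String) (p : Int) (lbl : String) (l : List String) (b : Int × String) :
    (l.map (fun t => (t, (p, lbl)))).foldl
      (fun best tc => if tc.2.1 < best.1 ∧ PySem.Str.isIn tc.1 lower = true then tc.2 else best) b
    = if p < b.1 ∧ l.any (fun t => PySem.Str.isIn t lower) = true then (p, lbl) else b := by
  induction l generalizing b with
  | nil => simp
  | cons t ts ih =>
    rw [List.map_cons, List.foldl_cons, List.any_cons]
    dsimp only
    by_cases h : PySem.Str.isIn t lower = true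
    · by_cases hp : p < b.1
      · rw [if_pos ⟨hp, h⟩, ih, if_neg (fun hc => absurd hc.1 (lt_irrefl p)),
            if_pos ⟨hp, by simp only [h, Bool.true_or]⟩]
      · rw [if_neg (fun hc => hp hc.1), ih, if_neg (fun hc => hp hc.1),
            if_neg (fun hc => hp hc.1)]
    · rw [Bool.not_eq_true] at h
      rw [if_neg (fun hc => by rw [h] at hc; exact absurd hc.2 (by simp)), ih, h,
          Bool.false_or]

theorem pvTable_eq :
    pvTokenPri =
      (["military", "war", "army", "combat", "weapon", "missile", "tank"].map
        (fun t => (t, ((0 : Int), "military")))) ++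
      (["flood", "quake", "fire", "disaster", "storm", "hurricane"].map
        (fun t => (t, ((1 : Int), "natural_disaster")))) ++
      (["protest", "riot", "demonstration", "unrest"].map
        (fun t => (t, ((2 : Int), "protest")))) := rfl

-- ===== VERDICT (by name: the statement is the Claim_ definition above) =====
theorem infer_scene_from_url_py_spec : Claim_equal_infer_scene_from_url_py := by
  intro u _
  unfold Spec_infer_scene_from_url_py infer_scene_from_url_py infer_scene_from_url_py_alt
  dsimp only
  rw [pvTable_eq]
  simp only [List.foldl_append]
  rw [pvFoldGroup, pvFoldGroup, pvFoldGroup]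
  rcases Bool.eq_false_or_eq_true (["military", "war", "army", "combat", "weapon", "missile",
      "tank"].any (fun t => PySem.Str.isIn t (PySem.Str.lower u))) with h1 | h1 <;>
  rcases Bool.eq_false_or_eq_true (["flood", "quake", "fire", "disaster", "storm",
      "hurricane"].any (fun t => PySem.Str.isIn t (PySem.Str.lower u))) with h2 | h2 <;>
  rcases Bool.eq_false_or_eq_true (["protest", "riot", "demonstration",
      "unrest"].any (fun t => PySem.Str.isIn t (PySem.Str.lower u))) with h3 | h3 <;>
  simp only [h1, h2, h3] <;> norm_num
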